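-- pv_equiv track=rewrite | github.com/jordaly/git_over_http | server.py | _safe_branch_name
-- ===== SOURCE A (Python) =====
-- def _safe_branch_name(name: str) -> bool:
--     if not name:
--         return False
--     if name.startswith("/") or name.endswith("/"):
--         return False
--     if name.startswith("-"):
--         return False
--     if "\\" in name:
--         return False
--     if any(c in name for c in [" ", "\t", "\n", "\r"]):
--         return False
--     if ".." in name or "//" in name:
--         return False
--     if name.endswith(".lock"):
--         return False
--     for ch in name:
--         ok = (
--             ("a" <= ch <= "z")
--             or ("A" <= ch <= "Z")
--             or ("0" <= ch <= "9")
--             or ch in "._-/"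
--         )
--         if not ok:
--             return False
--     return True
-- ===== SOURCE B (Python) =====
-- _SEG_CHARS = frozenset("abcdefghijklmnopqrstuvwxyzABCDEFGHIJKLMNOPQRSTUVWXYZ0123456789._-")
--
-- def _segment_ok(seg: str) -> bool:
--     # a path segment: nonempty, no "..", characters from the segment alphabet
--     return bool(seg) and ".." not in seg and set(seg) <= _SEG_CHARS
--
-- def _safe_branch_name(name: str) -> bool:
--     # decompose the ref into its '/'-separated path segments and validate each:
--     # empty segments cover the empty-name / leading-slash / trailing-slash / "//" rules,
--     # the segment alphabet covers whitespace and backslash, ".." cannot straddle a '/'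
--     segs = name.split("/")
--     return (all(map(_segment_ok, segs))
--             and not segs[0].startswith("-")
--             and not segs[-1].endswith(".lock"))
-- ===== Notes on version B (the rewrite author's own statement) =====
-- stated objective: alternative
-- what changed: B splits the name into its '/'-separated path segments (name.split('/')) and validates each segment once (nonempty, no '..', characters a subset of a frozenset segment alphabet) plus a first-segment leading-dash and a last-segment '.lock' check, instead of A's chain of whole-string substring/prefix/suffix guards followed by a per-character Python loop; the empty-name, leading/trailing-slash and double-slash rules all collapse into 'no empty segment', and the whitespace/backslash guards into the segment alphabet.
import Mathlib
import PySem

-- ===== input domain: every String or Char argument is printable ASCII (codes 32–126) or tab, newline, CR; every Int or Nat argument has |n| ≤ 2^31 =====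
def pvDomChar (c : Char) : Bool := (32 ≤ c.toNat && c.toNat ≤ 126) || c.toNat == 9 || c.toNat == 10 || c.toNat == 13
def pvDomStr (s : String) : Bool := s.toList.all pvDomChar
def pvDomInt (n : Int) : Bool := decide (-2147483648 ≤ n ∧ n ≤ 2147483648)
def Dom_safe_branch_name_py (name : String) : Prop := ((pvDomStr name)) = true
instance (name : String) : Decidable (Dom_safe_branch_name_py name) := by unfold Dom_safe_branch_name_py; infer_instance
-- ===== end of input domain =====

-- B validates the name by splitting it into its '/'-separated path segments and checking each
-- segment (alternative decomposition; same return value on the whole domain).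

-- ===== PORT A =====
-- per-character test of A's final for-loop
def aCharOk (c : Char) : Bool :=
  (('a' ≤ c && c ≤ 'z') || ('A' ≤ c && c ≤ 'Z') || ('0' ≤ c && c ≤ '9')
    || "._-/".toList.contains c)

-- A's final "for ch in name" loop with its early return
def aLoop : List Char → Bool
  | [] => true
  | c :: rest => if !(aCharOk c) then false else aLoop rest

def safe_branch_name_py (name : String) : Bool :=
  if name.toList = [] then false
  else if PySem.Str.startswith name "/" || PySem.Str.endswith name "/" then false
  else if PySem.Str.startswith name "-" then false
  else if PySem.Str.isIn "\\" name then false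
  else if [" ", "\t", "\n", "\r"].any (fun c => PySem.Str.isIn c name) then false
  else if PySem.Str.isIn ".." name || PySem.Str.isIn "//" name then false
  else if PySem.Str.endswith name ".lock" then false
  else aLoop name.toList

-- ===== PORT B =====
-- the frozenset _SEG_CHARS of Source B (distinct characters, membership test)
def bSegChars : List Char :=
  "abcdefghijklmnopqrstuvwxyzABCDEFGHIJKLMNOPQRSTUVWXYZ0123456789._-".toList

-- Source B's _segment_ok: nonempty, no "..", characters from the segment alphabet
def bSegOk (seg : List Char) : Bool :=
  !seg.isEmpty && !(PySem.Chars.isIn ['.', '.'] seg) && seg.all (fun c => bSegChars.contains c)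

-- name.split("/") is ported as List.splitOn '/' (Lean's counterpart of Python's
-- single-character str.split); segs[0] / segs[-1] as pyGet? 0 / pyGet? (-1)
-- (split never returns an empty list, so the none branches are unreachable).
def safe_branch_name_py_alt (name : String) : Bool :=
  let segs := name.toList.splitOn '/'
  segs.all bSegOk
    && !(match PySem.List.pyGet? segs 0 with
         | some s => PySem.Chars.startswith s ['-']
         | none => false)
    && !(match PySem.List.pyGet? segs (-1) with
         | some s => PySem.Chars.endswith s ['.', 'l', 'o', 'c', 'k']
         | none => false)

-- ===== PRECONDITION & SPEC =====
def Spec_safe_branch_name_py (name : String) (out : Bool) : Prop := out = safe_branch_name_py_alt name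
instance (name : String) (out : Bool) : Decidable (Spec_safe_branch_name_py name out) := by unfold Spec_safe_branch_name_py; infer_instance

-- ===== CLAIM (what is proved, stated in full; the proofs are below) =====
def Claim_equal_safe_branch_name_py : Prop := ∀ (name : String), Dom_safe_branch_name_py name → Spec_safe_branch_name_py name (safe_branch_name_py name)

-- ===== LEMMAS AND PROOFS =====

-- the common characterization both ports are reduced to
def Cond (cs : List Char) : Prop :=
  cs ≠ [] ∧ cs.head? ≠ some '/' ∧ cs.getLast? ≠ some '/' ∧ ('/', '/') ∉ cs.zip cs.tail ∧
  ('.', '.') ∉ cs.zip cs.tail ∧ (∀ c ∈ cs, aCharOk c = true) ∧ cs.head? ≠ some '-' ∧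
  ¬ ['.', 'l', 'o', 'c', 'k'] <:+ cs

-- ---- generic conversion lemmas (A side, reused for B) ----

lemma aLoop_eq_all (cs : List Char) : aLoop cs = cs.all aCharOk := by
  induction cs with
  | nil => rfl
  | cons c t ih => by_cases h : aCharOk c <;> simp [aLoop, h, ih]

lemma singleton_prefix_iff (a : Char) (l : List Char) : [a] <+: l ↔ l.head? = some a := by
  cases l with
  | nil => simp
  | cons b t => simp [List.cons_prefix_cons, eq_comm]

lemma singleton_suffix_iff (a : Char) (l : List Char) : [a] <:+ l ↔ l.getLast? = some a := by
  rw [← List.reverse_prefix (l₁ := [a]), List.reverse_singleton, singleton_prefix_iff,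
    List.head?_reverse]

lemma pair_infix_iff (a b : Char) (l : List Char) :
    [a, b] <:+: l ↔ (a, b) ∈ l.zip l.tail := by
  induction l with
  | nil => simp
  | cons c t ih =>
    rw [List.infix_cons_iff, ih]
    cases t with
    | nil => simp
    | cons d t' =>
      simp [List.cons_prefix_cons, Prod.ext_iff]

-- characters outside A's class that A's separate guards also reject
lemma aCharOk_not_special (x : Char) (hx : aCharOk x = true) :
    ¬(x = '\\' ∨ x = ' ' ∨ x = '\t' ∨ x = '\n' ∨ x = '\x0d') := by
  intro hc
  rcases hc with rfl | rfl | rfl | rfl | rfl <;> simp [aCharOk] at hx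

-- B's character class plus the separator is exactly A's class, on ASCII
set_option maxRecDepth 16384 in
lemma charclass_fin : ∀ n : Fin 128,
    (Char.ofNat n.val == '/' || bSegChars.contains (Char.ofNat n.val)) = aCharOk (Char.ofNat n.val) := by
  decide

lemma charclass (c : Char) (h : pvDomChar c = true) :
    (c == '/' || bSegChars.contains c) = aCharOk c := by
  have hlt : c.toNat < 128 := by
    simp [pvDomChar] at h; omega
  have := charclass_fin ⟨c.toNat, hlt⟩
  rwa [Char.ofNat_toNat] at this

-- ---- splitOn helpers (B side) ----

lemma segs_ne_nil (l : List Char) : l.splitOn '/' ≠ [] := by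
  simp only [List.splitOn]; exact List.splitOnP_ne_nil _ _

lemma obtain_segs (l : List Char) : ∃ s t, l.splitOn '/' = s :: t := by
  cases h : l.splitOn '/' with
  | nil => exact absurd h (segs_ne_nil l)
  | cons s t => exact ⟨s, t, rfl⟩

lemma segs_nil : ([] : List Char).splitOn '/' = [[]] := rfl

lemma segs_sep (l : List Char) : ('/'::l).splitOn '/' = [] :: l.splitOn '/' := by
  simp [List.splitOn, List.splitOnP_cons]

lemma segs_cons {a : Char} (l : List Char) (h : a ≠ '/') {s : List Char} {t : List (List Char)}
    (hst : l.splitOn '/' = s :: t) : (a::l).splitOn '/' = (a :: s) :: t := by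
  simp only [List.splitOn, List.splitOnP_cons] at *
  rw [if_neg (by simp [h]), hst, List.modifyHead_cons]

lemma segs_tail_nil_iff (cs : List Char) : (cs.splitOn '/').tail = [] ↔ '/' ∉ cs := by
  induction cs with
  | nil => simp
  | cons a l ih =>
    by_cases ha : a = '/'
    · subst ha
      rw [segs_sep]
      simp [segs_ne_nil l]
    · obtain ⟨s, t, hst⟩ := obtain_segs l
      rw [segs_cons l ha hst]
      rw [hst] at ih
      simp only [List.tail_cons] at ih ⊢
      simp [ih, Ne.symm ha]

lemma segs_of_not_mem (cs : List Char) (h : '/' ∉ cs) : cs.splitOn '/' = [cs] := by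
  induction cs with
  | nil => exact segs_nil
  | cons a l ih =>
    have ha : a ≠ '/' := by rintro rfl; exact h List.mem_cons_self
    have hl : '/' ∉ l := fun hm => h (List.mem_cons_of_mem a hm)
    exact segs_cons l ha (ih hl)

-- ---- the five segment characterizations ----

-- S1: every segment nonempty ⟺ nonempty name, no leading/trailing '/', no "//"
lemma segs_nonempty_char (cs : List Char) :
    ((∀ s ∈ cs.splitOn '/', s ≠ []) ↔
      cs ≠ [] ∧ cs.head? ≠ some '/' ∧ cs.getLast? ≠ some '/' ∧ ('/', '/') ∉ cs.zip cs.tail)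
    ∧ ((∀ s ∈ (cs.splitOn '/').tail, s ≠ []) ↔
      cs.getLast? ≠ some '/' ∧ ('/', '/') ∉ cs.zip cs.tail) := by
  induction cs with
  | nil =>
    constructor
    · simp
    · simp
  | cons a l ih =>
    by_cases ha : a = '/'
    · subst ha
      constructor
      · rw [segs_sep]; simp
      · rw [segs_sep]
        simp only [List.tail_cons]
        rw [ih.1]
        cases l with
        | nil => simp
        | cons b l' =>
          simp only [List.getLast?_cons_cons, List.zip_cons_cons, List.tail_cons,
            List.mem_cons, ne_eq, List.head?_cons]
          constructor
          · rintro ⟨h1, h2, h3, h4⟩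
            refine ⟨h3, ?_⟩
            rintro (he | hm)
            · exact h2 (by injection he with e1 e2; rw [e2])
            · exact h4 hm
          · rintro ⟨h3, h4⟩
            refine ⟨by simp, fun he => h4 (Or.inl (by injection he with e; rw [e])), h3, fun hm => h4 (Or.inr hm)⟩
    · obtain ⟨s, t, hst⟩ := obtain_segs l
      rw [hst] at ih
      constructor
      · rw [segs_cons l ha hst]
        simp only [List.mem_cons, List.tail_cons] at ih ⊢
        rw [forall_eq_or_imp]
        have h2 := ih.2
        constructor
        · rintro ⟨-, hrest⟩
          have := h2.mp hrest
          refine ⟨by simp, ?_, ?_, ?_⟩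
          · simp [ha]
          · cases l with
            | nil => simp [ha]
            | cons b l' => simp only [List.getLast?_cons_cons]; exact this.1
          · cases l with
            | nil => simp
            | cons b l' =>
              simp only [List.zip_cons_cons, List.tail_cons, List.mem_cons] at this ⊢
              rintro (he | hm)
              · exact ha (by injection he with e1 e2; rw [e1])
              · exact this.2 hm
        · rintro ⟨-, -, hlast, hzip⟩
          refine ⟨by simp, h2.mpr ?_⟩
          cases l with
          | nil => simp
          | cons b l' =>
            simp only [List.getLast?_cons_cons] at hlast
            simp only [List.zip_cons_cons, List.mem_cons] at hzip
            exact ⟨hlast, fun hm => hzip (Or.inr hm)⟩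
      · rw [segs_cons l ha hst]
        simp only [List.tail_cons] at ih ⊢
        rw [ih.2]
        cases l with
        | nil => simp [ha]
        | cons b l' =>
          simp only [List.getLast?_cons_cons, List.zip_cons_cons, List.tail_cons, List.mem_cons]
          constructor
          · rintro ⟨h3, h4⟩
            refine ⟨h3, ?_⟩
            rintro (he | hm)
            · exact ha (by injection he with e1 e2; rw [e1])
            · exact h4 hm
          · rintro ⟨h3, h4⟩
            exact ⟨h3, fun hm => h4 (Or.inr hm)⟩

-- S2: all characters of all segments in a class ⟺ all characters in the class + '/'
lemma segs_chars_char (q : Char → Bool) (cs : List Char) :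
    (∀ s ∈ cs.splitOn '/', ∀ c ∈ s, q c = true) ↔ (∀ c ∈ cs, c = '/' ∨ q c = true) := by
  induction cs with
  | nil => simp
  | cons a l ih =>
    by_cases ha : a = '/'
    · subst ha
      rw [segs_sep]
      simp only [List.mem_cons, forall_eq_or_imp, ih]
      simp
    · obtain ⟨s, t, hst⟩ := obtain_segs l
      rw [segs_cons l ha hst]
      rw [hst] at ih
      simp only [List.mem_cons, forall_eq_or_imp] at ih ⊢
      constructor
      · rintro ⟨⟨hqa, hs⟩, ht⟩
        exact ⟨Or.inr hqa, ih.mp ⟨hs, ht⟩⟩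
      · rintro ⟨hqa, hrest⟩
        have := ih.mpr hrest
        exact ⟨⟨hqa.resolve_left ha, this.1⟩, this.2⟩

-- S3: a ".." inside some segment ⟺ a ".." inside the name ('.' is not the separator)
lemma segs_dotdot_char (cs : List Char) :
    (∀ s ∈ cs.splitOn '/', ('.', '.') ∉ s.zip s.tail) ↔ ('.', '.') ∉ cs.zip cs.tail := by
  induction cs with
  | nil => simp
  | cons a l ih =>
    by_cases ha : a = '/'
    · subst ha
      rw [segs_sep]
      simp only [List.mem_cons, forall_eq_or_imp, ih]
      cases l with
      | nil => simp
      | cons b l' =>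
        simp only [List.zip_cons_cons, List.tail_cons, List.mem_cons]
        constructor
        · rintro ⟨-, h⟩ (he | hm)
          · have e1 : ('.' : Char) = '/' := congrArg Prod.fst he
            exact absurd e1 (by decide)
          · exact h hm
        · intro h
          exact ⟨by simp, fun hm => h (Or.inr hm)⟩
    · cases l with
      | nil =>
        rw [segs_cons ([] : List Char) ha segs_nil]
        simp
      | cons b l' =>
        by_cases hb : b = '/'
        · subst hb
          rw [segs_cons _ ha (segs_sep l')]
          rw [segs_sep] at ih
          simp only [List.mem_cons, forall_eq_or_imp] at ih ⊢
          simp only [List.zip_cons_cons, List.tail_cons, List.mem_cons]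
          have ih' := ih
          constructor
          · rintro ⟨-, ht⟩ (he | hm)
            · have e2 : ('.' : Char) = '/' := congrArg Prod.snd he
              exact absurd e2 (by decide)
            · exact (ih'.mp ⟨by simp, ht⟩) hm
          · intro h
            have := ih'.mpr (fun hm => h (Or.inr hm))
            exact ⟨by simp, this.2⟩
        · obtain ⟨s', t', hst'⟩ := obtain_segs l'
          have hsegl := segs_cons l' hb hst'
          rw [segs_cons _ ha hsegl]
          rw [hsegl] at ih
          simp only [List.mem_cons, forall_eq_or_imp] at ih ⊢
          simp only [List.zip_cons_cons, List.tail_cons, List.mem_cons] at ih ⊢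
          constructor
          · rintro ⟨hh, ht⟩
            rintro (he | hm)
            · exact hh (Or.inl he)
            · exact (ih.mp ⟨fun hm' => hh (Or.inr hm'), ht⟩) hm
          · intro h
            have := ih.mpr (fun hm => h (Or.inr hm))
            refine ⟨?_, this.2⟩
            rintro (he | hm)
            · exact h (Or.inl he)
            · exact this.1 hm

-- S4: the first segment starts with '-' ⟺ the name does
lemma segs_first_dash (cs : List Char) :
    (PySem.Chars.startswith ((cs.splitOn '/').headD []) ['-'] = true) ↔ cs.head? = some '-' := by
  cases cs with
  | nil => simp [PySem.Chars.startswith_iff]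
  | cons a l =>
    by_cases ha : a = '/'
    · subst ha
      rw [segs_sep]
      simp [PySem.Chars.startswith_iff]
    · obtain ⟨s, t, hst⟩ := obtain_segs l
      rw [segs_cons l ha hst]
      simp only [List.headD_cons, List.head?_cons]
      rw [PySem.Chars.startswith_iff]
      constructor
      · intro h
        rcases (List.cons_prefix_cons.mp h) with ⟨e, -⟩
        rw [e]
      · intro h
        have : a = '-' := by injection h
        rw [this]
        exact List.cons_prefix_cons.mpr ⟨rfl, List.nil_prefix⟩

-- S5: the last segment ends with ".lock" ⟺ the name does ('/' does not occur in ".lock")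
lemma segs_last_lock (cs : List Char) :
    (PySem.Chars.endswith ((cs.splitOn '/').getLast?.getD []) ['.', 'l', 'o', 'c', 'k'] = true) ↔
      ['.', 'l', 'o', 'c', 'k'] <:+ cs := by
  induction cs with
  | nil => simp [PySem.Chars.endswith_iff]
  | cons a l ih =>
    by_cases ha : a = '/'
    · subst ha
      rw [segs_sep]
      obtain ⟨s, t, hst⟩ := obtain_segs l
      rw [hst]
      rw [hst] at ih
      rw [List.getLast?_cons_cons]
      rw [ih, List.suffix_cons_iff]
      constructor
      · exact Or.inr
      · rintro (he | hs)
        · exfalso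
          injection he with e1 e2
          exact absurd e1 (by decide)
        · exact hs
    · by_cases hm : '/' ∈ l
      · obtain ⟨s, t, hst⟩ := obtain_segs l
        have ht : t ≠ [] := by
          intro he
          have := (segs_tail_nil_iff l).mp (by rw [hst, he]; rfl)
          exact this hm
        obtain ⟨u, v, huv⟩ : ∃ u v, t = u :: v := by
          cases t with
          | nil => exact absurd rfl ht
          | cons u v => exact ⟨u, v, rfl⟩
        rw [segs_cons l ha hst]
        rw [hst] at ih
        rw [huv] at ih ⊢
        rw [List.getLast?_cons_cons] at ih ⊢
        rw [ih, List.suffix_cons_iff]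
        constructor
        · exact Or.inr
        · rintro (he | hs)
          · exfalso
            injection he with e1 e2
            rw [← e2] at hm
            simp at hm
          · exact hs
      · have hcs : '/' ∉ a :: l := by
          simp only [List.mem_cons]
          rintro (h | h)
          · exact ha h.symm
          · exact hm h
        rw [segs_of_not_mem _ hcs]
        simp [PySem.Chars.endswith_iff]

-- ---- the two port characterizations ----

lemma pyGet_zero {α : Type} (a : α) (l : List α) : PySem.List.pyGet? (a :: l) 0 = some a := by
  simp [PySem.List.pyGet?, PySem.List.pyIdx?]

lemma pyGet_neg_one {α : Type} (l : List α) : PySem.List.pyGet? l (-1) = l.getLast? := by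
  simp [PySem.List.pyGet?, PySem.List.pyIdx?]
  cases l with
  | nil => simp
  | cons a t => simp [List.getLast?_eq_getElem?]

lemma A_iff (name : String) : safe_branch_name_py name = true ↔ Cond name.toList := by
  rcases h : name.toList with _ | ⟨c, t⟩
  · simp [safe_branch_name_py, h, Cond]
  · rw [Cond]
    simp only [safe_branch_name_py, h]
    simp only [PySem.Str.startswith_eq, PySem.Str.endswith_eq, PySem.Str.isIn_eq, h,
      List.any_cons, List.any_nil]
    simp [aLoop_eq_all, PySem.Chars.startswith_iff, PySem.Chars.endswith_iff,
      singleton_suffix_iff, pair_infix_iff, List.singleton_infix_iff,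
      PySem.Chars.isIn_eq_false_iff]
    constructor
    · rintro ⟨⟨h1, h2⟩, h3, -, -, ⟨hdd, hss⟩, hlock, hok1, hok2⟩
      exact ⟨fun e => h1 e.symm, h2, hss, hdd, ⟨hok1, hok2⟩, fun e => h3 e.symm, hlock⟩
    · rintro ⟨h1, h2, hss, hdd, ⟨hok1, hok2⟩, h3, hlock⟩
      have hnot : ∀ x ∈ c :: t,
          ¬(x = '\\' ∨ x = ' ' ∨ x = '\t' ∨ x = '\n' ∨ x = '\x0d') := by
        intro x hx
        rcases List.mem_cons.mp hx with rfl | hx'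
        · exact aCharOk_not_special x hok1
        · exact aCharOk_not_special x (hok2 x hx')
      refine ⟨⟨fun e => h1 e.symm, h2⟩, fun e => h3 e.symm, ⟨?_, ?_⟩,
        ⟨⟨?_, ?_⟩, ⟨?_, ?_⟩, ⟨?_, ?_⟩, ?_, ?_⟩, ⟨hdd, hss⟩, hlock, hok1, hok2⟩
      · exact fun e => hnot c List.mem_cons_self (Or.inl e.symm)
      · exact fun hm => hnot _ (List.mem_cons_of_mem c hm) (Or.inl rfl)
      · exact fun e => hnot c List.mem_cons_self (Or.inr (Or.inl e.symm))
      · exact fun hm => hnot _ (List.mem_cons_of_mem c hm) (Or.inr (Or.inl rfl))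
      · exact fun e => hnot c List.mem_cons_self (Or.inr (Or.inr (Or.inl e.symm)))
      · exact fun hm => hnot _ (List.mem_cons_of_mem c hm) (Or.inr (Or.inr (Or.inl rfl)))
      · exact fun e => hnot c List.mem_cons_self (Or.inr (Or.inr (Or.inr (Or.inl e.symm))))
      · exact fun hm => hnot _ (List.mem_cons_of_mem c hm) (Or.inr (Or.inr (Or.inr (Or.inl rfl))))
      · exact fun e => hnot c List.mem_cons_self (Or.inr (Or.inr (Or.inr (Or.inr e.symm))))
      · exact fun hm => hnot _ (List.mem_cons_of_mem c hm) (Or.inr (Or.inr (Or.inr (Or.inr rfl))))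

lemma B_iff (name : String) (hdom : pvDomStr name = true) :
    safe_branch_name_py_alt name = true ↔ Cond name.toList := by
  have hdom' : ∀ x ∈ name.toList, pvDomChar x = true := by
    simpa [pvDomStr, List.all_eq_true] using hdom
  have hS1 := (segs_nonempty_char name.toList).1
  have hS2 := segs_chars_char (fun c => bSegChars.contains c) name.toList
  have hS3 := segs_dotdot_char name.toList
  have hS4 := segs_first_dash name.toList
  have hS5 := segs_last_lock name.toList
  obtain ⟨s, t, hst⟩ := obtain_segs name.toList
  rw [hst] at hS1 hS2 hS3 hS4 hS5
  have hgd : (s :: t).getLast? = some ((s :: t).getLast?.getD []) := by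
    cases hx : (s :: t).getLast? with
    | none => exact absurd hx (by simp)
    | some y => rfl
  rw [Cond]
  simp only [safe_branch_name_py_alt, hst, pyGet_zero, pyGet_neg_one]
  rw [hgd]
  simp only [List.headD_cons] at hS4
  simp only [Bool.and_eq_true, List.all_eq_true, Bool.not_eq_true',
    bSegOk, List.isEmpty_eq_false_iff]
  constructor
  · rintro ⟨⟨hall, hdash⟩, hlock⟩
    have hne : ∀ x ∈ s :: t, x ≠ [] := fun x hx => ((hall x hx).1).1
    have hdd : ∀ x ∈ s :: t, ('.', '.') ∉ x.zip x.tail := by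
      intro x hx hm
      exact ((PySem.Chars.isIn_eq_false_iff _ _).mp ((hall x hx).1).2)
        ((pair_infix_iff '.' '.' x).mpr hm)
    have hcontains : ∀ x ∈ s :: t, ∀ c ∈ x, bSegChars.contains c = true :=
      fun x hx => (hall x hx).2
    obtain ⟨g1, g2, g3, g4⟩ := hS1.mp hne
    refine ⟨g1, g2, g3, g4, hS3.mp hdd, ?_, ?_, ?_⟩
    · intro c hc
      have h2 := hS2.mp hcontains c hc
      have hcc := charclass c (hdom' c hc)
      rw [← hcc]
      rcases h2 with he | hco
      · simp [he]
      · simp only [Bool.or_eq_true, beq_iff_eq]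
        exact Or.inr hco
    · exact fun he => by simp [hS4.mpr he] at hdash
    · exact fun hl => by simp [hS5.mpr hl] at hlock
  · rintro ⟨g1, g2, g3, g4, g5, gchar, gdash, glock⟩
    have hne := hS1.mpr ⟨g1, g2, g3, g4⟩
    have hdd := hS3.mpr g5
    have hcontains := hS2.mpr (fun c hc => by
      have hcc := charclass c (hdom' c hc)
      have ha := gchar c hc
      rw [← hcc] at ha
      simpa using ha)
    refine ⟨⟨fun x hx => ⟨⟨hne x hx, ?_⟩, hcontains x hx⟩, ?_⟩, ?_⟩
    · apply (PySem.Chars.isIn_eq_false_iff _ _).mpr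
      intro hinf
      exact hdd x hx ((pair_infix_iff '.' '.' x).mp hinf)
    · cases hx : PySem.Chars.startswith s ['-'] with
      | false => rfl
      | true => exact absurd (hS4.mp hx) gdash
    · cases hx : PySem.Chars.endswith ((s :: t).getLast?.getD []) ['.', 'l', 'o', 'c', 'k'] with
      | false => rfl
      | true => exact absurd (hS5.mp hx) glock

-- ===== VERDICT (by name: the statement is the Claim_ definition above) =====
theorem safe_branch_name_py_spec : Claim_equal_safe_branch_name_py := by
  intro name hdom
  unfold Spec_safe_branch_name_py
  rw [Bool.eq_iff_iff, A_iff name, B_iff name hdom]
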